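-- pv_equiv track=rewrite | github.com/Tskysheep/english-grammar-book | convert_u_to_note.py | parse_u_positions
-- ===== SOURCE A (Python) =====
-- def parse_u_positions(line):
--     """
--     解析一行中所有 <u>...</u> 的起止位置（按渲染后的字符位置）。
--     返回 [(render_start, render_end, content), ...]
--     """
--     results = []
--     render_pos = 0
--     i = 0
--     raw = line
--
--     while i < len(raw):
--         if raw[i:].startswith('<u>'):
--             # 找到 <u> 标签
--             start_render = render_pos
--             i += 3  # 跳过 <u>
--             # 找 </u>
--             end_tag = raw.find('</u>', i)
--             if end_tag == -1:
--                 break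
--             content = raw[i:end_tag]
--             # 计算内容的渲染长度
--             render_end = start_render + len(content)
--             results.append((start_render, render_end, content))
--             render_pos = render_end
--             i = end_tag + 4  # 跳过 </u>
--         else:
--             render_pos += 1
--             i += 1
--
--     return results
-- ===== SOURCE B (Python) =====
-- def parse_u_positions(line):
--     results = []
--     render = 0
--     rest = line
--     while True:
--         pre, tag, rest = rest.partition('<u>')
--         if not tag:
--             return results
--         render += len(pre)
--         content, tag2, rest = rest.partition('</u>')
--         if not tag2:
--             return results
--         results.append((render, render + len(content), content))
--         render += len(content)
-- ===== Notes on version B (the rewrite author's own statement) =====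
-- stated objective: faster
-- what changed: Replaced A's per-character index loop (a startswith test and a render_pos increment at every position) by repeated str.partition on the opening and closing tag markers, deriving render offsets from the lengths of the returned fragments.
import Mathlib
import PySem

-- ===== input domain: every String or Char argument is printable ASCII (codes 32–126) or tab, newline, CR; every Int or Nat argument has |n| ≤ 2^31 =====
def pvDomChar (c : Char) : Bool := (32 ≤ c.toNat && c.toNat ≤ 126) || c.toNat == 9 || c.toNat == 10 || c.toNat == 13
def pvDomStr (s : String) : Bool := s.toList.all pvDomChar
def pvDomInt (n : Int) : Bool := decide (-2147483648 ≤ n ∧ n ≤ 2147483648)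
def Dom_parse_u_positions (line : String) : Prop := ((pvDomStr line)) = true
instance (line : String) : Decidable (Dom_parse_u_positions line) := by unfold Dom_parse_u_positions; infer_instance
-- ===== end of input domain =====

-- B replaces A's per-character scanning loop by repeated str.partition on the two tag markers (simpler).

-- ===== PORT A =====
-- A's index i is represented by the remaining suffix raw[i:] (the same values, step for step);
-- raw.find('</u>', i), searching that suffix, is pvFindSub (exact: first index where the
-- nonempty pattern is a prefix; Python's -1 is none).
def pvFindSub (s pat : List Char) : Option Nat :=
  if pat.isPrefixOf s then some 0
  else match s with
    | [] => none
    | _ :: cs => (pvFindSub cs pat).map (· + 1)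

def pvGoA (s : List Char) (render_pos : Int) : List (Int × Int × String) :=
  if hs : s = [] then []                             -- while i < len(raw)
  else if ['<', 'u', '>'].isPrefixOf s then
    -- i += 3; end_tag = raw.find('</u>', i)
    match pvFindSub (s.drop 3) ['<', '/', 'u', '>'] with
    | none => []                                     -- break: earlier appends are the conses already emitted
    | some j =>
      let content := (s.drop 3).take j
      (render_pos, render_pos + content.length, String.mk content)
        :: pvGoA ((s.drop 3).drop (j + 4)) (render_pos + content.length)
  else pvGoA (s.drop 1) (render_pos + 1)             -- render_pos += 1; i += 1
termination_by s.length
decreasing_by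
  · have : s.length ≠ 0 := by simpa using hs
    simp; omega
  · have : s.length ≠ 0 := by simpa using hs
    simp; omega

def parse_u_positions (line : String) : List (Int × Int × String) :=
  pvGoA line.toList 0

-- ===== PORT B =====
-- Python str.partition(sep) for a nonempty sep, on char lists (exact):
-- (before, sep-found?, after); when the separator is absent, (s, false, []).
def pvPart (s pat : List Char) : List Char × Bool × List Char :=
  if pat.isPrefixOf s then ([], true, s.drop pat.length)
  else match s with
    | [] => ([], false, [])
    | c :: cs =>
      let t := pvPart cs pat
      (c :: t.1, t.2.1, t.2.2)

-- needed by pvGoB's termination proof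
theorem pvPart_found_length (s pat : List Char) (hpat : pat ≠ [])
    (h : (pvPart s pat).2.1 = true) :
    (pvPart s pat).2.2.length + pat.length ≤ s.length := by
  induction s with
  | nil =>
    rw [pvPart] at h
    simp [List.isPrefixOf_iff_prefix, List.prefix_nil, hpat] at h
  | cons c cs ih =>
    rw [pvPart] at h ⊢
    by_cases hp : pat.isPrefixOf (c :: cs)
    · have hle : pat.length ≤ (c :: cs).length :=
        (List.isPrefixOf_iff_prefix.mp hp).length_le
      simp only [List.length_cons] at hle ⊢
      simp [hp, List.length_drop]
      omega
    · simp only [if_neg hp] at h ⊢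
      have := ih h
      show (pvPart cs pat).2.2.length + pat.length ≤ cs.length + 1
      omega

def pvGoB (s : List Char) (render : Int) : List (Int × Int × String) :=
  let t1 := pvPart s ['<', 'u', '>']
  if h1 : t1.2.1 = true then
    let t2 := pvPart t1.2.2 ['<', '/', 'u', '>']
    if h2 : t2.2.1 = true then
      (render + t1.1.length, render + t1.1.length + t2.1.length, String.mk t2.1)
        :: pvGoB t2.2.2 (render + t1.1.length + t2.1.length)
    else []
  else []
termination_by s.length
decreasing_by
  have g1 := pvPart_found_length s ['<', 'u', '>'] (by simp) h1
  have g2 := pvPart_found_length (pvPart s ['<', 'u', '>']).2.2 ['<', '/', 'u', '>'] (by simp) h2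
  simp at g1 g2 ⊢
  omega

def parse_u_positions_alt (line : String) : List (Int × Int × String) :=
  pvGoB line.toList 0

-- ===== PRECONDITION & SPEC =====
def Spec_parse_u_positions (line : String) (out : List (Int × Int × String)) : Prop := out = parse_u_positions_alt line
instance (line : String) (out : List (Int × Int × String)) : Decidable (Spec_parse_u_positions line out) := by unfold Spec_parse_u_positions; infer_instance

-- ===== CLAIM (what is proved, stated in full; the proofs are below) =====
def Claim_equal_parse_u_positions : Prop := ∀ (line : String), Dom_parse_u_positions line → Spec_parse_u_positions line (parse_u_positions line)

-- ===== LEMMAS AND PROOFS =====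

-- pvPart in terms of pvFindSub
theorem pvPart_eq_findSub (s pat : List Char) :
    pvPart s pat =
      match pvFindSub s pat with
      | none => (s, false, [])
      | some j => (s.take j, true, s.drop (j + pat.length)) := by
  induction s with
  | nil =>
    rw [pvPart, pvFindSub]
    by_cases hp : pat.isPrefixOf ([] : List Char) <;> simp [hp]
  | cons c cs ih =>
    rw [pvPart, pvFindSub]
    by_cases hp : pat.isPrefixOf (c :: cs)
    · simp [hp]
    · simp only [if_neg hp, ih]
      cases hfs : pvFindSub cs pat with
      | none => simp
      | some j => simp [List.drop_succ_cons, Nat.add_right_comm]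

theorem pvGoB_cons_notpref (c : Char) (cs : List Char) (r : Int)
    (hp : ¬ (['<', 'u', '>'].isPrefixOf (c :: cs))) :
    pvGoB (c :: cs) r = pvGoB cs (r + 1) := by
  rw [pvGoB, pvGoB]
  have hpart : pvPart (c :: cs) ['<', 'u', '>'] =
      (c :: (pvPart cs ['<', 'u', '>']).1, (pvPart cs ['<', 'u', '>']).2.1,
        (pvPart cs ['<', 'u', '>']).2.2) := by
    rw [pvPart]; simp [hp]
  rw [hpart]
  by_cases h1 : (pvPart cs ['<', 'u', '>']).2.1 = true
  · simp only [h1, dite_true]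
    by_cases h2 : (pvPart (pvPart cs ['<', 'u', '>']).2.2 ['<', '/', 'u', '>']).2.1 = true
    · simp only [h2, dite_true, List.length_cons]
      push_cast
      ring_nf
    · simp [h2]
  · simp [h1]

theorem pvGoA_eq_pvGoB (s : List Char) (r : Int) : pvGoA s r = pvGoB s r := by
  induction hn : s.length using Nat.strong_induction_on generalizing s r with
  | _ n ih =>
  subst hn
  cases s with
  | nil =>
    rw [pvGoA, pvGoB]
    simp [pvPart]
  | cons c cs =>
    by_cases hp : (['<', 'u', '>'].isPrefixOf (c :: cs))
    · rw [pvGoA, pvGoB]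
      have hlen3 : 3 ≤ (c :: cs).length :=
        (List.isPrefixOf_iff_prefix.mp hp).length_le
      have hpart1 : pvPart (c :: cs) ['<', 'u', '>'] = ([], true, (c :: cs).drop 3) := by
        rw [pvPart]; simp [hp]
      rw [hpart1]
      simp only [dite_true, List.length_nil]
      rw [pvPart_eq_findSub]
      cases hfs : pvFindSub ((c :: cs).drop 3) ['<', '/', 'u', '>'] with
      | none => simp [hp]
      | some j =>
        have hj : j + 4 ≤ ((c :: cs).drop 3).length := by
          -- findSub = some j means pattern is a prefix of drop j
          have : ∀ (t : List Char) (k : Nat), pvFindSub t ['<', '/', 'u', '>'] = some k →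
              k + 4 ≤ t.length := by
            intro t
            induction t with
            | nil => intro k hk; rw [pvFindSub] at hk; simp [List.isPrefixOf_iff_prefix] at hk
            | cons a as iha =>
              intro k hk
              rw [pvFindSub] at hk
              by_cases hq : (['<', '/', 'u', '>'].isPrefixOf (a :: as))
              · have hle := (List.isPrefixOf_iff_prefix.mp hq).length_le
                simp only [List.length_cons] at hle ⊢
                simp [hq] at hk
                omega
              · simp only [if_neg hq, Option.map_eq_some_iff] at hk
                obtain ⟨k', hk', rfl⟩ := hk
                have := iha k' hk'
                simp only [List.length_cons] at this ⊢
                omega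
          exact this _ j hfs
        have hlt : (((c :: cs).drop 3).drop (j + 4)).length < (c :: cs).length := by
          simp only [List.length_drop, List.length_cons] at hj hlen3 ⊢
          omega
        have hrec := ih _ hlt (((c :: cs).drop 3).drop (j + 4))
            (r + ((c :: cs).drop 3 |>.take j).length) rfl
        have hlen_take : (((c :: cs).drop 3).take j).length = j := by
          simp only [List.length_take, List.length_drop, List.length_cons] at hj ⊢
          omega
        rw [if_pos hp]
        simp only [List.length_cons, List.length_nil]
        norm_num
        norm_num at hrec
        have hj' : j ≤ cs.length - 2 := by
          simp only [List.length_drop, List.length_cons] at hj; omega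
        have hmin : min (↑j : Int) (↑(cs.length - 2)) = (↑j : Int) := by
          rw [min_eq_left]; exact_mod_cast hj'
        rw [if_neg (List.cons_ne_nil c cs)]
        simp only [hmin] at hrec ⊢
        rw [hrec]
    · rw [pvGoA]
      simp only [List.cons_ne_nil, dite_false, if_neg hp, List.drop_one, List.tail_cons]
      rw [pvGoB_cons_notpref c cs r hp]
      exact ih cs.length (by simp) cs (r + 1) rfl

-- ===== VERDICT (by name: the statement is the Claim_ definition above) =====
theorem parse_u_positions_spec : Claim_equal_parse_u_positions := by
  intro line _
  unfold Spec_parse_u_positions parse_u_positions parse_u_positions_alt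
  exact pvGoA_eq_pvGoB _ _
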